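-- pv_equiv track=rewrite | github.com/Renelvon/codeforces | prob3/A/solve.py | calc_moves
-- ===== SOURCE A (Python) =====
-- import itertools
--
-- def calc_moves(start_pos, end_pos):
--     diff_hor = end_pos[0] - start_pos[0]
--     diff_vert = end_pos[1] - start_pos[1]
--
--     dir_vert = 'U' if diff_vert > 0 else 'D'
--     dir_hor = 'R' if diff_hor > 0 else 'L'
--
--     diff_hor = abs(diff_hor)
--     diff_vert = abs(diff_vert)
--
--     moves_hor = (dir_hor for _ in range(diff_hor))
--     moves_vert = (dir_vert for _ in range(diff_vert))
--
--     return tuple(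
--         ''.join(m_tuple)
--         for m_tuple in itertools.zip_longest(
--             moves_hor, moves_vert, fillvalue=''
--         )
--     )
-- ===== SOURCE B (Python) =====
-- def calc_moves(start_pos, end_pos):
--     diff_hor = end_pos[0] - start_pos[0]
--     diff_vert = end_pos[1] - start_pos[1]
--
--     dir_vert = 'U' if diff_vert > 0 else 'D'
--     dir_hor = 'R' if diff_hor > 0 else 'L'
--
--     diff_hor = abs(diff_hor)
--     diff_vert = abs(diff_vert)
--
--     diag = min(diff_hor, diff_vert)
--     moves = [dir_hor + dir_vert] * diag
--     if diff_hor > diff_vert: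
--         moves += [dir_hor] * (diff_hor - diff_vert)
--     else:
--         moves += [dir_vert] * (diff_vert - diff_hor)
--     return tuple(moves)
-- ===== Notes on version B (the rewrite author's own statement) =====
-- stated objective: simpler
-- what changed: Replaces the element-wise itertools.zip_longest pairing of two generators with closed-form block concatenation: min(|dh|,|dv|) copies of the diagonal string followed by the leftover straight moves.
import Mathlib
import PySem

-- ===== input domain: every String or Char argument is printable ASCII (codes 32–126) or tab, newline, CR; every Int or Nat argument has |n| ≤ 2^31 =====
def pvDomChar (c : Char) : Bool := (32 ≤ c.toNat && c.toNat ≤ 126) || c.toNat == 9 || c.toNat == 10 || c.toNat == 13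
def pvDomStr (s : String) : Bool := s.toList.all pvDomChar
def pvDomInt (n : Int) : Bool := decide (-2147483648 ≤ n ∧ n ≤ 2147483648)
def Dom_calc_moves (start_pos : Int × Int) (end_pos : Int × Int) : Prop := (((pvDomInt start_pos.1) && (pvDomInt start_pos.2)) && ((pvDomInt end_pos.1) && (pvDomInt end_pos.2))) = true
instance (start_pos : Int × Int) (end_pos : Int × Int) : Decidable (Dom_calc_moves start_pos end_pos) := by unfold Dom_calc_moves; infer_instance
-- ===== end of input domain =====

-- B replaces the element-wise zip_longest of A with closed-form block concatenation (objective: simpler).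

-- ===== PORT A =====
-- itertools.zip_longest(xs, ys, fillvalue='') for two string iterables, ported by hand (exact).
def pvZipLongest : List String → List String → List (String × String)
  | [], [] => []
  | x :: xs, [] => (x, "") :: pvZipLongest xs []
  | [], y :: ys => ("", y) :: pvZipLongest [] ys
  | x :: xs, y :: ys => (x, y) :: pvZipLongest xs ys

def calc_moves (start_pos : Int × Int) (end_pos : Int × Int) : List String :=
  let diff_hor := end_pos.1 - start_pos.1
  let diff_vert := end_pos.2 - start_pos.2
  let dir_vert := if diff_vert > 0 then "U" else "D"
  let dir_hor := if diff_hor > 0 then "R" else "L"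
  let diff_hor := |diff_hor|
  let diff_vert := |diff_vert|
  let moves_hor := (PySem.List.pyRange 0 diff_hor 1).map (fun _ => dir_hor)
  let moves_vert := (PySem.List.pyRange 0 diff_vert 1).map (fun _ => dir_vert)
  (pvZipLongest moves_hor moves_vert).map (fun p => p.1 ++ p.2)

-- ===== PORT B =====
def calc_moves_alt (start_pos : Int × Int) (end_pos : Int × Int) : List String :=
  let diff_hor := end_pos.1 - start_pos.1
  let diff_vert := end_pos.2 - start_pos.2
  let dir_vert := if diff_vert > 0 then "U" else "D"
  let dir_hor := if diff_hor > 0 then "R" else "L"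
  let a := |diff_hor|.toNat
  let b := |diff_vert|.toNat
  let diag := min a b
  let moves := List.replicate diag (dir_hor ++ dir_vert)
  moves ++ (if a > b then List.replicate (a - b) dir_hor else List.replicate (b - a) dir_vert)

-- ===== PRECONDITION & SPEC =====
def Spec_calc_moves (start_pos : Int × Int) (end_pos : Int × Int) (out : List String) : Prop := out = calc_moves_alt start_pos end_pos
instance (start_pos : Int × Int) (end_pos : Int × Int) (out : List String) : Decidable (Spec_calc_moves start_pos end_pos out) := by unfold Spec_calc_moves; infer_instance

-- ===== CLAIM (what is proved, stated in full; the proofs are below) =====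
def Claim_equal_calc_moves : Prop := ∀ (start_pos : Int × Int) (end_pos : Int × Int), Dom_calc_moves start_pos end_pos → Spec_calc_moves start_pos end_pos (calc_moves start_pos end_pos)

-- ===== LEMMAS AND PROOFS =====

lemma pvZipLongest_nil_left (b : Nat) (v : String) :
    (pvZipLongest [] (List.replicate b v)).map (fun p => p.1 ++ p.2) = List.replicate b v := by
  induction b with
  | zero => simp [pvZipLongest]
  | succ n ih => simpa [pvZipLongest, List.replicate_succ] using ih

lemma pvZipLongest_nil_right (a : Nat) (h : String) :
    (pvZipLongest (List.replicate a h) []).map (fun p => p.1 ++ p.2) = List.replicate a h := by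
  induction a with
  | zero => simp [pvZipLongest]
  | succ n ih => simpa [pvZipLongest, List.replicate_succ] using ih

lemma pvZipLongest_replicate (a b : Nat) (h v : String) :
    (pvZipLongest (List.replicate a h) (List.replicate b v)).map (fun p => p.1 ++ p.2)
      = List.replicate (min a b) (h ++ v)
        ++ (if a > b then List.replicate (a - b) h else List.replicate (b - a) v) := by
  induction a generalizing b with
  | zero => simpa using pvZipLongest_nil_left b v
  | succ n ih =>
    cases b with
    | zero => simpa using pvZipLongest_nil_right (n + 1) h
    | succ m =>
      have := ih m
      simp only [List.replicate_succ, pvZipLongest, List.map_cons, this]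
      have hmin : min (n + 1) (m + 1) = min n m + 1 := by omega
      rw [hmin]
      by_cases hc : n > m
      · simp [hc, List.replicate_succ]
      · simp [hc, List.replicate_succ]

lemma pyRange_map_const (d : Int) (c : String) :
    (PySem.List.pyRange 0 d 1).map (fun _ => c) = List.replicate d.toNat c := by
  rw [PySem.List.pyRange_one, List.map_map]
  show (List.range (d - 0).toNat).map (fun _ => c) = _
  simp [List.map_const']

theorem calc_moves_spec : Claim_equal_calc_moves := by
  intro s e _
  unfold Spec_calc_moves calc_moves calc_moves_alt
  simp only [pyRange_map_const]
  exact pvZipLongest_replicate _ _ _ _
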